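-- pv_equiv track=rewrite | github.com/Amanda2024/KBQA-militaryKG | parser_cypher_search.py | match_attri_comp
-- ===== SOURCE A (Python) =====
-- def match_attri_comp(final_dict):
--     pattern = list(final_dict.values())
--     words = list(final_dict.keys())
--     token = [[0] * len(pattern)][0]  # 定义全零列表作为flag
--     listsPattern = []  # 存储n_compares这样的标记
--     listsValue = []  # 存储对应的值
--     lists = []
--     for i in range(len(pattern)):
--         if (pattern[i] == 'n_attri'):
--             list1 = []
--             list2 = []
--             list1.append(words[i])
--             list2.append(pattern[i])
--             for j in range(i):  # 先匹配前面的
--                 if (pattern[j] == 'n_compares' and token[j] == 0):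
--                     list1.append(words[j])
--                     list2.append(pattern[j])
--                     token[j] = 1
--                 if (pattern[j] == 'n_number' and token[j] == 0):
--                     list1.append(words[j])
--                     list2.append(pattern[j])
--                     token[j] = 1
--             if (len(list1) == 1):  # 前面没匹配到，匹配后面的
--                 for j in range(i + 1, len(pattern)):
--                     if (pattern[j] == 'n_attri'):
--                         break
--                     if (pattern[j] == 'n_compares' and token[j] == 0):
--                         list1.append(words[j])
--                         list2.append(pattern[j])
--                         token[j] = 1
--                     if (pattern[j] == 'n_number' and token[j] == 0):
--                         list1.append(words[j])
--                         list2.append(pattern[j])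
--                         token[j] = 1
--             listsValue.append(list1)
--             listsPattern.append(list2)
--     return listsValue, listsPattern
-- ===== SOURCE B (Python) =====
-- def match_attri_comp(final_dict):
--     listsValue = []   # closed groups (values)
--     listsPattern = [] # closed groups (patterns)
--     cur_v = None      # open group collecting forward, or None
--     cur_p = None
--     pend_w = []       # unmatched compare/number words, in order
--     pend_p = []
--     for word, pat in final_dict.items():
--         if pat == 'n_attri':
--             if cur_v is not None:
--                 listsValue.append(cur_v)
--                 listsPattern.append(cur_p)
--                 cur_v = cur_p = None
--             if pend_w:
--                 listsValue.append([word] + pend_w)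
--                 listsPattern.append(['n_attri'] + pend_p)
--                 pend_w, pend_p = [], []
--             else:
--                 cur_v, cur_p = [word], ['n_attri']
--         elif pat == 'n_compares' or pat == 'n_number':
--             if cur_v is not None:
--                 cur_v.append(word)
--                 cur_p.append(pat)
--             else:
--                 pend_w.append(word)
--                 pend_p.append(pat)
--     if cur_v is not None:
--         listsValue.append(cur_v)
--         listsPattern.append(cur_p)
--     return listsValue, listsPattern
-- ===== Notes on version B (the rewrite author's own statement) =====
-- stated objective: alternative
-- what changed: Replaced A's per-attribute rescans of the whole prefix/suffix with a token flag array by a single left-to-right pass that keeps a queue of pending unmatched compare/number tokens and one currently-open forward-collecting group.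
import Mathlib
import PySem

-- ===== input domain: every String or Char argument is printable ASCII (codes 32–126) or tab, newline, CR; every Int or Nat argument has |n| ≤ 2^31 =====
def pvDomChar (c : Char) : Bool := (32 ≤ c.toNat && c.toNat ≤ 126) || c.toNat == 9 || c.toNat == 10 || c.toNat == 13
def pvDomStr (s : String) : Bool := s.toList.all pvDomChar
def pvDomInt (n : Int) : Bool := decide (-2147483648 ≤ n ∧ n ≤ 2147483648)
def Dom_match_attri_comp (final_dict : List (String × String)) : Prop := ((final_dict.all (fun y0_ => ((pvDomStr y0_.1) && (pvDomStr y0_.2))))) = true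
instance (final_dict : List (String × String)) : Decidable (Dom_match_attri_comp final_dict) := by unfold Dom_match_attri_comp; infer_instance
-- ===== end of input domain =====

-- B is a single pass with a pending queue and one open group instead of A's per-attribute
-- rescans of the prefix/suffix with a token flag array (alternative single-pass algorithm).

-- ===== PORT A =====
-- body of A's inner loops: the two 'if pattern[j] == … and token[j] == 0' statements
def macStep (pattern words : List String) (st : List Nat × List String × List String) (j : Nat) :
    List Nat × List String × List String :=
  let (token, l1, l2) := st
  let (token, l1, l2) :=
    if pattern.getD j "" = "n_compares" ∧ token.getD j 0 = 0 then
      (token.set j 1, l1 ++ [words.getD j ""], l2 ++ [pattern.getD j ""])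
    else (token, l1, l2)
  if pattern.getD j "" = "n_number" ∧ token.getD j 0 = 0 then
    (token.set j 1, l1 ++ [words.getD j ""], l2 ++ [pattern.getD j ""])
  else (token, l1, l2)

-- A's forward loop 'for j in range(i+1, len(pattern))' with its break at the next 'n_attri'
def macFwd (pattern words : List String) : List Nat → (List Nat × List String × List String) → (List Nat × List String × List String)
  | [], st => st
  | j :: js, st =>
    if pattern.getD j "" = "n_attri" then st
    else macFwd pattern words js (macStep pattern words st j)

-- one iteration of A's outer loop
def macOuter (pattern words : List String) (n : Nat)
    (st : List Nat × List (List String) × List (List String)) (i : Nat) :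
    List Nat × List (List String) × List (List String) :=
  let (token, lv, lp) := st
  if pattern.getD i "" = "n_attri" then
    let l1 : List String := [words.getD i ""]
    let l2 : List String := [pattern.getD i ""]
    let (token, l1, l2) := (List.range i).foldl (macStep pattern words) (token, l1, l2)
    let (token, l1, l2) :=
      if l1.length = 1 then macFwd pattern words (List.range' (i+1) (n - (i+1))) (token, l1, l2)
      else (token, l1, l2)
    (token, lv ++ [l1], lp ++ [l2])
  else (token, lv, lp)

def match_attri_comp (final_dict : List (String × String)) : List (List String) × List (List String) :=
  let d := PySem.Dict.ofList final_dict
  let pattern := d.values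
  let words := d.keys
  let n := pattern.length
  let r := (List.range n).foldl (macOuter pattern words n) (List.replicate n 0, [], [])
  (r.2.1, r.2.2)

-- ===== PORT B =====
-- state: (listsValue, listsPattern, open group cur (value side, pattern side), pend_w, pend_p)
def macAltStep
    (st : List (List String) × List (List String) × Option (List String × List String) × List String × List String)
    (it : String × String) :
    List (List String) × List (List String) × Option (List String × List String) × List String × List String :=
  let (lv, lp, cur, pw, pp) := st
  if it.2 = "n_attri" then
    let (lv, lp) := match cur with
      | some (cv, cp) => (lv ++ [cv], lp ++ [cp])
      | none => (lv, lp)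
    if pw = [] then (lv, lp, some ([it.1], ["n_attri"]), [], [])
    else (lv ++ [it.1 :: pw], lp ++ ["n_attri" :: pp], none, [], [])
  else if it.2 = "n_compares" ∨ it.2 = "n_number" then
    match cur with
    | some (cv, cp) => (lv, lp, some (cv ++ [it.1], cp ++ [it.2]), pw, pp)
    | none => (lv, lp, none, pw ++ [it.1], pp ++ [it.2])
  else (lv, lp, cur, pw, pp)

def match_attri_comp_alt (final_dict : List (String × String)) : List (List String) × List (List String) :=
  let d := PySem.Dict.ofList final_dict
  let r := d.items.foldl macAltStep ([], [], none, [], [])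
  match r.2.2.1 with
  | some (cv, cp) => (r.1 ++ [cv], r.2.1 ++ [cp])
  | none => (r.1, r.2.1)

-- ===== PRECONDITION & SPEC =====
def Spec_match_attri_comp (final_dict : List (String × String)) (out : List (List String) × List (List String)) : Prop := out = match_attri_comp_alt final_dict
instance (final_dict : List (String × String)) (out : List (List String) × List (List String)) : Decidable (Spec_match_attri_comp final_dict out) := by unfold Spec_match_attri_comp; infer_instance

-- ===== CLAIM (what is proved, stated in full; the proofs are below) =====
def Claim_equal_match_attri_comp : Prop := ∀ (final_dict : List (String × String)), Dom_match_attri_comp final_dict → Spec_match_attri_comp final_dict (match_attri_comp final_dict)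

-- ===== LEMMAS AND PROOFS =====

-- a pattern string that joins a group ('n_compares' or 'n_number')
def isTok (s : String) : Bool := s == "n_compares" || s == "n_number"

-- indices j < i of still-unmatched group tokens
def selU (P : List String) (token : List Nat) (i : Nat) : List Nat :=
  (List.range i).filter (fun j => isTok (P.getD j "") && token.getD j 0 == 0)

-- index of the first 'n_attri' at position ≥ i (or P.length)
def naIdx (P : List String) (i : Nat) : Nat :=
  if h : i < P.length then
    (if P.getD i "" = "n_attri" then i else naIdx P (i+1))
  else i
termination_by P.length - i

-- token indices collected by A's forward loop over range' a m (stop at the first 'n_attri')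
def fsel (P : List String) (a m : Nat) : List Nat :=
  ((List.range' a m).takeWhile (fun j => !(P.getD j "" == "n_attri"))).filter
    (fun j => isTok (P.getD j ""))

-- token indices in [a, b)
def gapSel (P : List String) (a b : Nat) : List Nat :=
  (List.range' a (b - a)).filter (fun j => isTok (P.getD j ""))

def mark1 (token : List Nat) (s : List Nat) : List Nat :=
  s.foldl (fun t j => t.set j 1) token

lemma macStep_eq (P W : List String) (token : List Nat) (l1 l2 : List String) (j : Nat) :
    macStep P W (token, l1, l2) j =
      if isTok (P.getD j "") = true ∧ token.getD j 0 = 0 then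
        (token.set j 1, l1 ++ [W.getD j ""], l2 ++ [P.getD j ""])
      else (token, l1, l2) := by
  simp only [macStep]
  split_ifs <;> simp_all [isTok]

lemma mark1_getD (s : List Nat) (token : List Nat) (j : Nat) :
    (mark1 token s).getD j 0 = if j ∈ s ∧ j < token.length then 1 else token.getD j 0 := by
  induction s generalizing token with
  | nil => simp [mark1]
  | cons a s ih =>
    simp only [mark1, List.foldl_cons] at *
    rw [ih]
    by_cases hja : j = a
    · subst hja
      by_cases hl : j < token.length <;>
        by_cases hm : j ∈ s <;>
          simp [hm, hl, List.getD]
    · simp [List.length_set, List.getD, List.getElem?_set_ne (by omega : a ≠ j), hja]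

lemma mark1_length (s : List Nat) (token : List Nat) :
    (mark1 token s).length = token.length := by
  induction s generalizing token with
  | nil => rfl
  | cons a s ih => simp [mark1, List.foldl_cons] at *; rw [ih]; simp

lemma selU_lt (P : List String) (token : List Nat) (i j : Nat) (h : j ∈ selU P token i) : j < i := by
  unfold selU at h
  exact List.mem_range.mp (List.mem_filter.mp h).1

lemma back_lemma (P W : List String) (i : Nat) (token : List Nat) (l1 l2 : List String) :
    (List.range i).foldl (macStep P W) (token, l1, l2) =
      (mark1 token (selU P token i),
       l1 ++ (selU P token i).map (fun j => W.getD j ""),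
       l2 ++ (selU P token i).map (fun j => P.getD j "")) := by
  induction i generalizing l1 l2 with
  | zero => simp [selU, mark1]
  | succ i ih =>
    rw [List.range_succ, List.foldl_append, ih, List.foldl_cons, List.foldl_nil, macStep_eq]
    have hnot : i ∉ selU P token i := fun h => absurd (selU_lt P token i i h) (by omega)
    have hget : (mark1 token (selU P token i)).getD i 0 = token.getD i 0 := by
      rw [mark1_getD]; simp [hnot]
    have hsel : selU P token (i+1) =
        selU P token i ++ List.filter (fun j => isTok (P.getD j "") && token.getD j 0 == 0) [i] := by
      unfold selU; rw [List.range_succ, List.filter_append]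
    by_cases hc : isTok (P.getD i "") = true ∧ token.getD i 0 = 0
    · have hb : (isTok (P.getD i "") && (token.getD i 0 == 0)) = true := by
        simp only [Bool.and_eq_true, beq_iff_eq]; exact ⟨hc.1, hc.2⟩
      rw [if_pos (by rw [hget]; exact hc), hsel, List.filter_singleton, hb]
      simp [mark1, List.map_append]
    · have hb : (isTok (P.getD i "") && (token.getD i 0 == 0)) = false := by
        cases h' : (isTok (P.getD i "") && (token.getD i 0 == 0))
        · rfl
        · exact absurd (by simpa using h') hc
      rw [if_neg (by rw [hget]; exact hc), hsel, List.filter_singleton, hb]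
      simp

lemma fsel_succ_not_attri (P : List String) (a m : Nat) (h : ¬ P.getD a "" = "n_attri") :
    fsel P a (m+1) = (if isTok (P.getD a "") = true then [a] else []) ++ fsel P (a+1) m := by
  have hb : (!(P.getD a "" == "n_attri")) = true := by
    cases hx : P.getD a "" == "n_attri"
    · rfl
    · exact absurd (eq_of_beq hx) h
  simp only [fsel, List.range'_succ, List.takeWhile_cons, hb, if_true, List.filter_cons]
  cases isTok (P.getD a "") <;> simp

lemma fsel_succ_attri (P : List String) (a m : Nat) (h : P.getD a "" = "n_attri") :
    fsel P a (m+1) = [] := by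
  have hb : (!(P.getD a "" == "n_attri")) = false := by
    cases hx : P.getD a "" == "n_attri"
    · exact absurd h (ne_of_beq_false hx)
    · rfl
  simp only [fsel, List.range'_succ, List.takeWhile_cons, hb]
  simp

lemma fwd_lemma (P W : List String) (m a : Nat) (token : List Nat) (l1 l2 : List String)
    (h : ∀ j, a ≤ j → token.getD j 0 = 0) :
    macFwd P W (List.range' a m) (token, l1, l2) =
      (mark1 token (fsel P a m),
       l1 ++ (fsel P a m).map (fun j => W.getD j "") ,
       l2 ++ (fsel P a m).map (fun j => P.getD j "")) := by
  induction m generalizing a token l1 l2 with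
  | zero => simp [macFwd, fsel, mark1]
  | succ m ih =>
    rw [List.range'_succ]
    by_cases hA : P.getD a "" = "n_attri"
    · rw [fsel_succ_attri P a m hA]
      simp only [macFwd]
      rw [if_pos hA]
      simp [mark1]
    · have hstep := macStep_eq P W token l1 l2 a
      rw [fsel_succ_not_attri P a m hA]
      simp only [macFwd]
      rw [if_neg hA]
      by_cases hT : isTok (P.getD a "") = true
      · rw [hstep, if_pos ⟨hT, h a le_rfl⟩, ih (a+1) (token.set a 1) _ _
          (fun j hj => by
            rw [List.getD, List.getElem?_set_ne (by omega : a ≠ j)]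
            exact h j (by omega)), if_pos hT]
        simp [mark1]
      · rw [hstep, if_neg (fun hx => hT hx.1), ih (a+1) token _ _ (fun j hj => h j (by omega)),
          if_neg hT]
        simp

lemma naIdx_ge (P : List String) (a : Nat) : a ≤ naIdx P a := by
  fun_induction naIdx P a with
  | case1 a h hp => omega
  | case2 a h hp ih => omega
  | case3 a h => omega

lemma naIdx_le (P : List String) (a : Nat) (h : a ≤ P.length) : naIdx P a ≤ P.length := by
  fun_induction naIdx P a with
  | case1 a h hp => omega
  | case2 a h hp ih => exact ih (by omega)
  | case3 a h => omega

lemma naIdx_attri (P : List String) (a : Nat) (h : a < P.length) (hp : P.getD a "" = "n_attri") :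
    naIdx P a = a := by
  rw [naIdx, dif_pos h, if_pos hp]

lemma naIdx_not_attri_lt (P : List String) (a : Nat) (h : a < P.length) (hp : ¬ P.getD a "" = "n_attri") :
    naIdx P a = naIdx P (a+1) := by
  rw [naIdx, dif_pos h, if_neg hp]

lemma naIdx_of_ge (P : List String) (a : Nat) (h : P.length ≤ a) : naIdx P a = a := by
  rw [naIdx, dif_neg (by omega)]

lemma fsel_eq_gapSel (P : List String) (a : Nat) :
    a ≤ P.length → fsel P a (P.length - a) = gapSel P a (naIdx P a) := by
  fun_induction naIdx P a with
  | case1 a h hp =>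
    intro ha
    have hs : P.length - a = (P.length - (a+1)) + 1 := by omega
    rw [hs, fsel_succ_attri P a _ hp]
    simp [gapSel]
  | case2 a h hp ih =>
    intro ha
    have hs : P.length - a = (P.length - (a+1)) + 1 := by omega
    rw [hs, fsel_succ_not_attri P a _ hp, ih (by omega)]
    have h1 : a + 1 ≤ naIdx P (a+1) := naIdx_ge P (a+1)
    have hg : gapSel P a (naIdx P (a+1)) =
        (a :: List.range' (a+1) (naIdx P (a+1) - (a+1))).filter (fun j => isTok (P.getD j "")) := by
      unfold gapSel
      congr 1
      have hd : naIdx P (a+1) - a = (naIdx P (a+1) - (a+1)) + 1 := by omega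
      rw [hd, List.range'_succ]
    rw [hg, List.filter_cons]
    cases isTok (P.getD a "") <;> simp [gapSel]
  | case3 a h =>
    intro ha
    have hz : P.length - a = 0 := by omega
    rw [hz]
    simp [fsel, gapSel]

lemma mem_selU (P : List String) (tok : List Nat) (i j : Nat) :
    j ∈ selU P tok i ↔ j < i ∧ isTok (P.getD j "") = true ∧ tok.getD j 0 = 0 := by
  unfold selU
  simp [List.mem_filter, List.mem_range]

lemma mem_gapSel (P : List String) (a b j : Nat) :
    j ∈ gapSel P a b ↔ (a ≤ j ∧ j < b) ∧ isTok (P.getD j "") = true := by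
  unfold gapSel
  constructor
  · intro h
    have h1 := (List.mem_filter.mp h).1
    have h2 := (List.mem_filter.mp h).2
    have := List.mem_range'_1.mp h1
    exact ⟨by omega, by simpa using h2⟩
  · intro ⟨⟨h1, h2⟩, h3⟩
    exact List.mem_filter.mpr ⟨List.mem_range'_1.mpr ⟨h1, by omega⟩, by simpa using h3⟩

lemma gapSel_empty (P : List String) (a b : Nat) (h : b ≤ a) : gapSel P a b = [] := by
  unfold gapSel
  rw [(by omega : b - a = 0)]
  rfl

lemma gapSel_cons (P : List String) (i b : Nat) (h : i < b) :
    gapSel P i b = (if isTok (P.getD i "") = true then [i] else []) ++ gapSel P (i+1) b := by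
  unfold gapSel
  rw [(by omega : b - i = (b - (i+1)) + 1), List.range'_succ, List.filter_cons]
  cases isTok (P.getD i "") <;> simp

lemma selU_succ (P : List String) (tok : List Nat) (i : Nat) :
    selU P tok (i+1) = selU P tok i ++
      List.filter (fun j => isTok (P.getD j "") && tok.getD j 0 == 0) [i] := by
  unfold selU
  rw [List.range_succ, List.filter_append]

-- the simulation invariant after i steps
def InvProp (l : List (String × String)) (i : Nat) : Prop :=
  let P := l.map Prod.snd
  let W := l.map Prod.fst
  let n := l.length
  let a := (List.range i).foldl (macOuter P W n) (List.replicate n 0, [], [])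
  let b := (l.take i).foldl macAltStep ([], [], none, [], [])
  a.1.length = n ∧
  (∀ j, a.1.getD j 0 ≠ 0 → isTok (P.getD j "") = true) ∧
  (match b.2.2.1 with
   | none =>
       a.2.1 = b.1 ∧ a.2.2 = b.2.1 ∧
       b.2.2.2.1 = (selU P a.1 i).map (fun j => W.getD j "") ∧
       b.2.2.2.2 = (selU P a.1 i).map (fun j => P.getD j "") ∧
       (∀ j, i ≤ j → a.1.getD j 0 = 0)
   | some (cv, cp) =>
       a.2.1 = b.1 ++ [cv ++ (gapSel P i (naIdx P i)).map (fun j => W.getD j "")] ∧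
       a.2.2 = b.2.1 ++ [cp ++ (gapSel P i (naIdx P i)).map (fun j => P.getD j "")] ∧
       b.2.2.2.1 = [] ∧ b.2.2.2.2 = [] ∧
       (∀ j, a.1.getD j 0 = 0 ↔ ¬(isTok (P.getD j "") = true ∧ j < naIdx P i)))

lemma selU_nil_iff_marked (P : List String) (tok : List Nat)
    (htok : ∀ j, tok.getD j 0 ≠ 0 → isTok (P.getD j "") = true)
    (i : Nat) (hge : ∀ j, i ≤ j → tok.getD j 0 = 0) (hnil : selU P tok i = []) :
    ∀ j, tok.getD j 0 = 0 ↔ ¬(isTok (P.getD j "") = true ∧ j < i) := by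
  intro j
  constructor
  · intro h0 hc
    have : j ∈ selU P tok i := (mem_selU P tok i j).mpr ⟨hc.2, hc.1, h0⟩
    rw [hnil] at this
    exact absurd this (List.not_mem_nil)
  · intro hc
    by_contra hne
    have hT := htok j hne
    have hlt : j < i := by
      by_contra hge'
      exact hne (hge j (by omega))
    exact hc ⟨hT, hlt⟩

lemma htok_mark (P : List String) (tok : List Nat) (s : List Nat)
    (h : ∀ j, tok.getD j 0 ≠ 0 → isTok (P.getD j "") = true)
    (hs : ∀ j ∈ s, isTok (P.getD j "") = true) :
    ∀ j, (mark1 tok s).getD j 0 ≠ 0 → isTok (P.getD j "") = true := by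
  intro j hj
  rw [mark1_getD] at hj
  by_cases hc : j ∈ s ∧ j < tok.length
  · exact hs j hc.1
  · rw [if_neg hc] at hj
    exact h j hj

lemma mark_open_iff (P : List String) (tok : List Nat) (i na' : Nat)
    (hlen : tok.length = P.length)
    (hna1 : i + 1 ≤ na') (hna2 : na' ≤ P.length)
    (hold : ∀ j, tok.getD j 0 = 0 ↔ ¬(isTok (P.getD j "") = true ∧ j < i))
    (hPi : isTok (P.getD i "") = false) :
    ∀ j, (mark1 tok (gapSel P (i+1) na')).getD j 0 = 0 ↔
      ¬(isTok (P.getD j "") = true ∧ j < na') := by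
  intro j
  rw [mark1_getD]
  by_cases hj : j ∈ gapSel P (i+1) na'
  · obtain ⟨⟨hj1, hj2⟩, hjT⟩ := (mem_gapSel P (i+1) na' j).mp hj
    rw [if_pos ⟨hj, by omega⟩]
    exact iff_of_false (by omega) (fun hc => hc ⟨hjT, hj2⟩)
  · rw [if_neg (fun hc => hj hc.1), hold j]
    by_cases hT : isTok (P.getD j "") = true
    · by_cases hji : j < i
      · exact iff_of_false (not_not_intro ⟨hT, hji⟩) (not_not_intro ⟨hT, by omega⟩)
      · by_cases hji2 : j = i
        · exact absurd hT (by rw [hji2, hPi]; simp)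
        · by_cases hjn : j < na'
          · exact absurd ((mem_gapSel P (i+1) na' j).mpr ⟨⟨by omega, hjn⟩, hT⟩) hj
          · exact iff_of_true (fun hc => absurd hc.2 (by omega))
              (fun hc => absurd hc.2 hjn)
    · exact iff_of_true (fun hc => hT hc.1) (fun hc => hT hc.1)

lemma selU_after_mark (P : List String) (tok : List Nat) (i : Nat)
    (hlen : ∀ j ∈ selU P tok i, j < tok.length)
    (hPi : isTok (P.getD i "") = false) :
    selU P (mark1 tok (selU P tok i)) (i+1) = [] := by
  rw [List.eq_nil_iff_forall_not_mem]
  intro j hj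
  obtain ⟨hj1, hjT, hj0⟩ := (mem_selU _ _ _ j).mp hj
  rw [mark1_getD] at hj0
  by_cases hm : j ∈ selU P tok i ∧ j < tok.length
  · rw [if_pos hm] at hj0; exact absurd hj0 (by omega)
  · rw [if_neg hm] at hj0
    by_cases hji : j = i
    · rw [hji] at hjT; rw [hjT] at hPi; exact absurd hPi (by simp)
    · have hjlt : j < i := by omega
      have : j ∈ selU P tok i := (mem_selU _ _ _ j).mpr ⟨hjlt, hjT, hj0⟩
      exact hm ⟨this, hlen j this⟩

lemma inv_holds (l : List (String × String)) : ∀ i, i ≤ l.length → InvProp l i := by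
  have hrep : ∀ j, (List.replicate l.length (0:Nat)).getD j 0 = 0 := by
    intro j; rw [List.getD, List.getElem?_replicate]; split <;> rfl
  have hPlen : (l.map Prod.snd).length = l.length := by simp
  intro i
  induction i with
  | zero =>
    intro _
    unfold InvProp
    dsimp only
    refine ⟨by simp, fun j hj => absurd (hrep j) hj, ?_⟩
    exact ⟨by trivial, by trivial, by simp [selU], by simp [selU], fun j _ => hrep j⟩
  | succ i ih =>
    intro hi1
    have hi : i < l.length := by omega
    have h := ih (by omega)
    unfold InvProp at h ⊢
    dsimp only at h ⊢
    obtain ⟨hlen, htok, hm⟩ := h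
    have htake : l.take (i+1) = l.take i ++ [l[i]] := by
      rw [List.take_add_one, List.getElem?_eq_getElem hi]
      rfl
    rw [List.range_succ, htake, List.foldl_append, List.foldl_append,
        List.foldl_cons, List.foldl_nil, List.foldl_cons, List.foldl_nil]
    have hPi : (l.map Prod.snd).getD i "" = (l[i]).2 := by
      rw [List.getD, List.getElem?_map, List.getElem?_eq_getElem hi]
      rfl
    have hWi : (l.map Prod.fst).getD i "" = (l[i]).1 := by
      rw [List.getD, List.getElem?_map, List.getElem?_eq_getElem hi]
      rfl
    generalize hA : (List.range i).foldl
        (macOuter (l.map Prod.snd) (l.map Prod.fst) l.length)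
        (List.replicate l.length 0, [], []) = sa at *
    obtain ⟨tok, lv, lp⟩ := sa
    generalize hB : (l.take i).foldl macAltStep ([], [], none, [], []) = sb at *
    obtain ⟨bv, bp, cur, pw, pp⟩ := sb
    rcases cur with _ | ⟨cv, cp⟩
    · -- cur = none
      obtain ⟨e1, e2, e3, e4, e5⟩ := hm
      dsimp only at e1 e2 e3 e4 e5
      by_cases hq1 : (l[i]).2 = "n_attri"
      · -- attribute token arrives
        by_cases hsel : selU (l.map Prod.snd) tok i = []
        · -- nothing pending: A scans forward, B opens a group
          dsimp only at hlen htok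
          rw [hsel] at e3 e4
          simp only [List.map_nil] at e3 e4
          have hfg : fsel (l.map Prod.snd) (i+1) (l.length - (i+1)) =
              gapSel (l.map Prod.snd) (i+1) (naIdx (l.map Prod.snd) (i+1)) := by
            rw [← hPlen]; exact fsel_eq_gapSel _ _ (by omega)
          have hPiT : isTok ((l.map Prod.snd).getD i "") = false := by
            rw [hPi, hq1]; decide
          have hold := selU_nil_iff_marked (l.map Prod.snd) tok htok i e5 hsel
          have hna1 : i + 1 ≤ naIdx (l.map Prod.snd) (i+1) := naIdx_ge _ _
          have hna2 : naIdx (l.map Prod.snd) (i+1) ≤ (l.map Prod.snd).length :=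
            naIdx_le _ _ (by omega)
          simp only [macOuter, macAltStep]
          rw [hPi, hWi, if_pos hq1, back_lemma, hsel]
          simp only [List.map_nil, List.append_nil, mark1, List.foldl_nil]
          rw [if_pos (by rfl), fwd_lemma _ _ _ _ _ _ _ (fun j hj => e5 j (by omega)), hfg]
          rw [if_pos hq1, if_pos e3]
          dsimp only
          refine ⟨?_, ?_, ?_, ?_, rfl, rfl, ?_⟩
          · rw [mark1_length, hlen]
          · exact htok_mark _ _ _ htok
              (fun j hj => ((mem_gapSel _ _ _ j).mp hj).2)
          · rw [e1]
          · rw [e2, hq1]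
          · have := mark_open_iff (l.map Prod.snd) tok i (naIdx (l.map Prod.snd) (i+1))
              (by rw [hlen, hPlen]) hna1 hna2 hold hPiT
            exact this
        · -- pending tokens: A collects them backward, B drains the queue
          dsimp only at hlen htok
          have hpw : ¬ pw = [] := by
            rw [e3]
            intro h
            exact hsel (List.map_eq_nil_iff.mp h)
          have hPiT : isTok ((l.map Prod.snd).getD i "") = false := by
            rw [hPi, hq1]; decide
          have hlenS : ∀ j ∈ selU (l.map Prod.snd) tok i, j < tok.length := by
            intro j hj
            have := ((mem_selU _ _ _ j).mp hj).1
            omega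
          simp only [macOuter, macAltStep]
          rw [hPi, hWi, if_pos hq1, back_lemma]
          rw [if_neg (fun hc => hsel (by
            rw [List.length_append, List.length_map] at hc
            simp only [List.length_singleton] at hc
            exact List.eq_nil_of_length_eq_zero (by omega)))]
          rw [if_pos hq1, if_neg hpw]
          dsimp only
          refine ⟨?_, ?_, ?_, ?_, ?_, ?_, ?_⟩
          · rw [mark1_length, hlen]
          · exact htok_mark _ _ _ htok (fun j hj => ((mem_selU _ _ _ j).mp hj).2.1)
          · rw [e1, e3]
            rfl
          · rw [e2, e4, hq1]
            rfl
          · rw [selU_after_mark _ _ _ hlenS hPiT]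
            rfl
          · rw [selU_after_mark _ _ _ hlenS hPiT]
            rfl
          · intro j hj
            rw [mark1_getD]
            rw [if_neg (fun hc => absurd (((mem_selU _ _ _ j).mp hc.1).1) (by omega))]
            exact e5 j (by omega)
      · by_cases hq2 : isTok ((l[i]).2) = true
        · -- compare/number token, no open group: B queues it, A does nothing
          dsimp only at hlen htok
          have hor : (l[i]).2 = "n_compares" ∨ (l[i]).2 = "n_number" := by
            simpa [isTok] using hq2
          have hmapi : List.map (fun j => (l.map Prod.fst).getD j "") [i] = [(l[i]).1] := by
            simp only [List.map_cons, List.map_nil]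
            rw [hWi]
          have hmapi2 : List.map (fun j => (l.map Prod.snd).getD j "") [i] = [(l[i]).2] := by
            simp only [List.map_cons, List.map_nil]
            rw [hPi]
          have hsucc : selU (l.map Prod.snd) tok (i+1) = selU (l.map Prod.snd) tok i ++ [i] := by
            rw [selU_succ, List.filter_singleton,
              show (isTok ((l.map Prod.snd).getD i "") && (tok.getD i 0 == 0)) = true by
                rw [hPi, e5 i le_rfl]
                simp [hq2]]
            rfl
          simp only [macOuter, macAltStep]
          rw [hPi, if_neg hq1, if_neg hq1, if_pos hor]
          dsimp only
          refine ⟨hlen, htok, e1, e2, ?_, ?_, fun j hj => e5 j (by omega)⟩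
          · rw [e3, hsucc, List.map_append, hmapi]
          · rw [e4, hsucc, List.map_append, hmapi2]
        · -- irrelevant token: both sides do nothing
          dsimp only at hlen htok
          have hnor : ¬((l[i]).2 = "n_compares" ∨ (l[i]).2 = "n_number") := by
            intro h
            exact hq2 (by rcases h with h | h <;> rw [h] <;> decide)
          have hf : isTok ((l[i]).2) = false := by
            cases hb : isTok ((l[i]).2)
            · rfl
            · exact absurd hb hq2
          have hsucc : selU (l.map Prod.snd) tok (i+1) = selU (l.map Prod.snd) tok i := by
            rw [selU_succ, List.filter_singleton,
              show (isTok ((l.map Prod.snd).getD i "") && (tok.getD i 0 == 0)) = false by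
                rw [hPi, hf]
                rfl]
            simp
          simp only [macOuter, macAltStep]
          rw [hPi, if_neg hq1, if_neg hq1, if_neg hnor]
          dsimp only
          exact ⟨hlen, htok, e1, e2, by rw [e3, hsucc], by rw [e4, hsucc],
            fun j hj => e5 j (by omega)⟩
    · -- cur = some (cv, cp): an open group is collecting forward
      obtain ⟨e1, e2, e3, e4, e5⟩ := hm
      dsimp only at e1 e2 e3 e4 e5
      by_cases hq1 : (l[i]).2 = "n_attri"
      · -- next attribute: A starts a fresh group (scanning forward), B closes and reopens
        dsimp only at hlen htok
        have hPattr : (l.map Prod.snd).getD i "" = "n_attri" := by rw [hPi]; exact hq1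
        have hna : naIdx (l.map Prod.snd) i = i :=
          naIdx_attri _ _ (by rw [hPlen]; omega) hPattr
        rw [hna] at e1 e2 e5
        rw [gapSel_empty _ _ _ le_rfl] at e1 e2
        simp only [List.map_nil, List.append_nil] at e1 e2
        have hsel : selU (l.map Prod.snd) tok i = [] := by
          rw [List.eq_nil_iff_forall_not_mem]
          intro j hj
          obtain ⟨h1, h2, h3⟩ := (mem_selU _ _ _ j).mp hj
          exact ((e5 j).mp h3) ⟨h2, h1⟩
        have hfg : fsel (l.map Prod.snd) (i+1) (l.length - (i+1)) =
            gapSel (l.map Prod.snd) (i+1) (naIdx (l.map Prod.snd) (i+1)) := by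
          rw [← hPlen]; exact fsel_eq_gapSel _ _ (by omega)
        have hPiT : isTok ((l.map Prod.snd).getD i "") = false := by rw [hPattr]; decide
        have hna1 : i + 1 ≤ naIdx (l.map Prod.snd) (i+1) := naIdx_ge _ _
        have hna2 : naIdx (l.map Prod.snd) (i+1) ≤ (l.map Prod.snd).length :=
          naIdx_le _ _ (by omega)
        simp only [macOuter, macAltStep]
        rw [hPi, hWi, if_pos hq1, back_lemma, hsel]
        simp only [List.map_nil, List.append_nil, mark1, List.foldl_nil]
        rw [if_pos (by rfl), fwd_lemma _ _ _ _ _ _ _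
          (fun j hj => (e5 j).mpr (fun hc => absurd hc.2 (by omega))), hfg]
        rw [if_pos hq1, if_pos e3]
        dsimp only
        refine ⟨?_, ?_, ?_, ?_, rfl, rfl, ?_⟩
        · rw [mark1_length, hlen]
        · exact htok_mark _ _ _ htok (fun j hj => ((mem_gapSel _ _ _ j).mp hj).2)
        · rw [e1]
        · rw [e2, hq1]
        · exact mark_open_iff _ tok i _ (by rw [hlen, hPlen]) hna1 hna2 e5 hPiT
      · by_cases hq2 : isTok ((l[i]).2) = true
        · -- compare/number token: already inside A's group, B appends to the open group
          dsimp only at hlen htok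
          have hPne : ¬ (l.map Prod.snd).getD i "" = "n_attri" := by
            rw [hPi]; intro h; rw [h] at hq2; exact absurd hq2 (by decide)
          have hnaeq : naIdx (l.map Prod.snd) i = naIdx (l.map Prod.snd) (i+1) :=
            naIdx_not_attri_lt _ _ (by rw [hPlen]; omega) hPne
          have hor : (l[i]).2 = "n_compares" ∨ (l[i]).2 = "n_number" := by
            simpa [isTok] using hq2
          have hmapi : List.map (fun j => (l.map Prod.fst).getD j "") [i] = [(l[i]).1] := by
            simp only [List.map_cons, List.map_nil]
            rw [hWi]
          have hmapi2 : List.map (fun j => (l.map Prod.snd).getD j "") [i] = [(l[i]).2] := by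
            simp only [List.map_cons, List.map_nil]
            rw [hPi]
          have hgap : gapSel (l.map Prod.snd) i (naIdx (l.map Prod.snd) i) =
              [i] ++ gapSel (l.map Prod.snd) (i+1) (naIdx (l.map Prod.snd) (i+1)) := by
            rw [gapSel_cons _ _ _
                (by have := naIdx_ge (l.map Prod.snd) (i+1); omega),
              if_pos (by rw [hPi]; exact hq2), hnaeq]
          rw [hgap] at e1 e2
          simp only [macOuter, macAltStep]
          rw [hPi, if_neg hq1, if_neg hq1, if_pos hor]
          dsimp only
          refine ⟨hlen, htok, ?_, ?_, e3, e4, fun j => by rw [← hnaeq]; exact e5 j⟩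
          · rw [e1, List.map_append, hmapi]
            simp
          · rw [e2, List.map_append, hmapi2]
            simp
        · -- irrelevant token: both sides do nothing
          dsimp only at hlen htok
          have hPne : ¬ (l.map Prod.snd).getD i "" = "n_attri" := by
            rw [hPi]; exact hq1
          have hnaeq : naIdx (l.map Prod.snd) i = naIdx (l.map Prod.snd) (i+1) :=
            naIdx_not_attri_lt _ _ (by rw [hPlen]; omega) hPne
          have hnor : ¬((l[i]).2 = "n_compares" ∨ (l[i]).2 = "n_number") := by
            intro h
            exact hq2 (by rcases h with h | h <;> rw [h] <;> decide)
          have hf : isTok ((l[i]).2) = false := by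
            cases hb : isTok ((l[i]).2)
            · rfl
            · exact absurd hb hq2
          have hgap : gapSel (l.map Prod.snd) i (naIdx (l.map Prod.snd) i) =
              gapSel (l.map Prod.snd) (i+1) (naIdx (l.map Prod.snd) (i+1)) := by
            rw [gapSel_cons _ _ _
                (by have := naIdx_ge (l.map Prod.snd) (i+1); omega),
              if_neg (by rw [hPi, hf]; simp), hnaeq]
            rfl
          rw [hgap] at e1 e2
          simp only [macOuter, macAltStep]
          rw [hPi, if_neg hq1, if_neg hq1, if_neg hnor]
          dsimp only
          exact ⟨hlen, htok, e1, e2, e3, e4, fun j => by rw [← hnaeq]; exact e5 j⟩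

lemma main_eq (l : List (String × String)) :
    (let P := l.map Prod.snd
     let W := l.map Prod.fst
     let n := l.length
     let r := (List.range n).foldl (macOuter P W n) (List.replicate n 0, [], [])
     ((r.2.1, r.2.2) : List (List String) × List (List String))) =
    (let r := l.foldl macAltStep ([], [], none, [], [])
     match r.2.2.1 with
     | some (cv, cp) => (r.1 ++ [cv], r.2.1 ++ [cp])
     | none => (r.1, r.2.1)) := by
  dsimp only
  have h := inv_holds l l.length le_rfl
  unfold InvProp at h
  dsimp only at h
  rw [List.take_length] at h
  obtain ⟨hlen, htok, hm⟩ := h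
  rcases hb : (l.foldl macAltStep ([], [], none, [], [])).2.2.1 with _ | ⟨cv, cp⟩ <;>
    rw [hb] at hm
  · rw [hm.1, hm.2.1]
  · have hna : naIdx (l.map Prod.snd) l.length = l.length :=
      naIdx_of_ge _ _ (by simp)
    rw [hna] at hm
    rw [gapSel_empty _ _ _ le_rfl] at hm
    simp only [List.map_nil, List.append_nil] at hm
    rw [hm.1, hm.2.1]

-- ===== VERDICT (by name: the statement is the Claim_ definition above) =====
theorem match_attri_comp_spec : Claim_equal_match_attri_comp := by
  intro final_dict _
  unfold Spec_match_attri_comp match_attri_comp match_attri_comp_alt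
  have h := main_eq (PySem.Dict.ofList final_dict).items
  simpa [PySem.Dict.values, PySem.Dict.keys] using h
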